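-- pv_equiv track=rewrite | github.com/boschresearch/UVAST | utils.py | convert_labels
-- ===== SOURCE A (Python) =====
-- def convert_labels(labels):
--     action_borders = [i for i in range(len(labels) - 1) if labels[i] != labels[i + 1]]
--     action_borders.insert(0, -1)
--     action_borders.append(len(labels) - 1)
--     label_start_end = []
--     for i in range(1, len(action_borders)):
--         label, start, end = labels[action_borders[i]], action_borders[i - 1] + 1, action_borders[i]
--         label_start_end.append((label, start, end))
--     return label_start_end
-- ===== SOURCE B (Python) =====
-- def convert_labels(labels):
--     result = []
--     start = 0
--     for i, (prev, cur) in enumerate(zip(labels, labels[1:]), 1):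
--         if cur != prev:
--             result.append((prev, start, i - 1))
--             start = i
--     result.append((labels[-1], start, len(labels) - 1))
--     return result
-- ===== Notes on version B (the rewrite author's own statement) =====
-- stated objective: simpler
-- what changed: B replaces A's two-phase build-a-border-index-table-then-index-back-into-both-lists approach with a single linear scan over adjacent pairs that keeps the current run's start in a variable.
import Mathlib
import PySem

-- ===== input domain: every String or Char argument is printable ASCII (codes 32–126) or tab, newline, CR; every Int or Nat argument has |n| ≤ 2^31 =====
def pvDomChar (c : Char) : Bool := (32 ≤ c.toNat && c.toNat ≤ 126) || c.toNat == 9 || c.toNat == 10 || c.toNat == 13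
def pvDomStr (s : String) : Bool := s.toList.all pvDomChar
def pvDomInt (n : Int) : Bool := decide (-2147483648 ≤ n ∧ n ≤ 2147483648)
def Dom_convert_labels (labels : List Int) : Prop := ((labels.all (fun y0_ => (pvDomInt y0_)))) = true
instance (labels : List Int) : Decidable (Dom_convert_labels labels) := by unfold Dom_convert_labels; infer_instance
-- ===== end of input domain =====

-- B replaces A's build-a-border-table-then-index pass by one linear scan over adjacent
-- pairs that keeps the current run's start (objective: simpler, one pass, no index table).

-- ===== PORT A =====
-- port of: action_borders = [i for i in range(len(labels)-1) if labels[i] != labels[i+1]];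
-- insert(0,-1); append(len-1); then for i in range(1, len(action_borders)) append
-- (labels[ab[i]], ab[i-1]+1, ab[i]).  pyGetD's default 0 is never read on inputs where
-- the Python returns (all indices are then in range; on [] Python raises, excluded by Pre_).
def convert_labels (labels : List Int) : List (Int × Int × Int) :=
  let ab : List Int :=
    (-1) :: ((PySem.List.pyRange 0 ((labels.length : Int) - 1) 1).filter
        (fun i => PySem.List.pyGetD labels i 0 ≠ PySem.List.pyGetD labels (i + 1) 0))
      ++ [(labels.length : Int) - 1]
  (PySem.List.pyRange 1 (ab.length : Int) 1).foldl
    (fun acc i =>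
      acc ++ [(PySem.List.pyGetD labels (PySem.List.pyGetD ab i 0) 0,
               PySem.List.pyGetD ab (i - 1) 0 + 1,
               PySem.List.pyGetD ab i 0)]) []

-- ===== PORT B =====
-- the for-loop of Source B over enumerate(zip(labels, labels[1:]), 1), as structural
-- recursion over the pair list with the same state (i, start, result)
def altLoop (i : Int) (start : Int) (acc : List (Int × Int × Int)) :
    List (Int × Int) → List (Int × Int × Int) × Int
  | [] => (acc, start)
  | (prev, cur) :: rest =>
    if cur ≠ prev then altLoop (i + 1) i (acc ++ [(prev, start, i - 1)]) rest
    else altLoop (i + 1) start acc rest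

def convert_labels_alt (labels : List Int) : List (Int × Int × Int) :=
  let p := altLoop 1 0 [] (labels.zip (PySem.List.slice labels (some 1) none))
  p.1 ++ [(PySem.List.pyGetD labels (-1) 0, p.2, (labels.length : Int) - 1)]

-- ===== PRECONDITION & SPEC =====
-- Pre_ excludes only the empty list, on which A raises IndexError (its loop indexes the
-- empty labels at a negative position); B raises IndexError there too.
def Pre_convert_labels (labels : List Int) : Prop := labels ≠ []
instance (labels : List Int) : Decidable (Pre_convert_labels labels) := by
  unfold Pre_convert_labels; infer_instance
def pvWitness_convert_labels : List Int := [1, 1, 2]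

def Spec_convert_labels (labels : List Int) (out : List (Int × Int × Int)) : Prop := out = convert_labels_alt labels
instance (labels : List Int) (out : List (Int × Int × Int)) : Decidable (Spec_convert_labels labels out) := by unfold Spec_convert_labels; infer_instance

-- ===== CLAIM (what is proved, stated in full; the proofs are below) =====
def Claim_equal_convert_labels : Prop := ∀ (labels : List Int), Dom_convert_labels labels → Pre_convert_labels labels → Spec_convert_labels labels (convert_labels labels)

-- ===== LEMMAS AND PROOFS =====

-- the border-index list A builds (without the -1 / len-1 sentinels)
def bords (ls : List Int) : List Int :=
  (PySem.List.pyRange 0 ((ls.length : Int) - 1) 1).filter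
    (fun i => PySem.List.pyGetD ls i 0 ≠ PySem.List.pyGetD ls (i + 1) 0)

-- the segment list read off a border list: one triple per border q, start = previous border + 1
def pairs (ls : List Int) : Int → List Int → List (Int × Int × Int)
  | _, [] => []
  | p, q :: qs => (PySem.List.pyGetD ls q 0, p + 1, q) :: pairs ls q qs

theorem pairs_snoc (ls : List Int) (p q : Int) (qs : List Int) :
    pairs ls p (qs ++ [q]) = pairs ls p qs ++ [(PySem.List.pyGetD ls q 0, qs.getLastD p + 1, q)] := by
  induction qs generalizing p with
  | nil => simp [pairs]
  | cons r rs ih =>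
    rw [List.cons_append, pairs, pairs, ih r, List.getLastD_cons, List.cons_append]

theorem pairs_congr (ls ls' : List Int) (p : Int) (qs : List Int)
    (h : ∀ q ∈ qs, PySem.List.pyGetD ls q 0 = PySem.List.pyGetD ls' q 0) :
    pairs ls p qs = pairs ls' p qs := by
  induction qs generalizing p with
  | nil => rfl
  | cons r rs ih =>
    simp [pairs, h r (by simp)]
    exact ih r (fun q hq => h q (by simp [hq]))

theorem pyGetD_append_left (ls : List Int) (x : Int) (q : Int)
    (h0 : 0 ≤ q) (h1 : q < (ls.length : Int)) :
    PySem.List.pyGetD (ls ++ [x]) q 0 = PySem.List.pyGetD ls q 0 := by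
  rw [PySem.List.pyGetD_eq_getElem (ls ++ [x]) 0 h0 (by simp; omega),
      PySem.List.pyGetD_eq_getElem ls 0 h0 h1]
  exact List.getElem_append_left (by omega)

theorem pyGetD_last (ls : List Int) (h : ls ≠ []) :
    PySem.List.pyGetD ls ((ls.length : Int) - 1) 0 = ls.getLast h := by
  have hl : 0 < ls.length := List.length_pos_iff.mpr h
  rw [PySem.List.pyGetD_eq_getElem ls 0 (by omega) (by omega), List.getLast_eq_getElem]
  congr 1
  omega

-- A's fold over indices 1..len(ab) equals `pairs` on ab's tail
theorem foldA_eq (ls : List Int) (p : Int) (qs : List Int) (acc : List (Int × Int × Int)) :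
    (PySem.List.pyRange 1 (((p :: qs).length : Int)) 1).foldl
      (fun acc i =>
        acc ++ [(PySem.List.pyGetD ls (PySem.List.pyGetD (p :: qs) i 0) 0,
                 PySem.List.pyGetD (p :: qs) (i - 1) 0 + 1,
                 PySem.List.pyGetD (p :: qs) i 0)]) acc
    = acc ++ pairs ls p qs := by
  induction qs using List.reverseRecOn with
  | nil =>
    have h1 : ((p :: ([] : List Int)).length : Int) = 1 := by simp
    rw [h1, PySem.List.pyRange_one_eq_nil le_rfl]
    simp [pairs]
  | append_singleton qs' q ih =>
    have hm : (((p :: (qs' ++ [q])).length : Int)) = ((p :: qs').length : Int) + 1 := by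
      simp
    have hlen : (0:Int) < ((p :: qs').length : Int) := by
      exact_mod_cast Nat.succ_pos qs'.length
    rw [hm, PySem.List.pyRange_one_succ_right (by omega), List.foldl_append]
    have hcongr := PySem.List.foldl_congr_mem
      (PySem.List.pyRange 1 ((p :: qs').length : Int) 1)
      (fun acc i =>
        acc ++ [(PySem.List.pyGetD ls (PySem.List.pyGetD (p :: (qs' ++ [q])) i 0) 0,
                 PySem.List.pyGetD (p :: (qs' ++ [q])) (i - 1) 0 + 1,
                 PySem.List.pyGetD (p :: (qs' ++ [q])) i 0)])
      (fun acc i =>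
        acc ++ [(PySem.List.pyGetD ls (PySem.List.pyGetD (p :: qs') i 0) 0,
                 PySem.List.pyGetD (p :: qs') (i - 1) 0 + 1,
                 PySem.List.pyGetD (p :: qs') i 0)]) acc ?_
    · rw [hcongr, ih]
      have h1 : PySem.List.pyGetD (p :: (qs' ++ [q])) ((p :: qs').length : Int) 0 = q := by
        rw [← List.cons_append, PySem.List.pyGetD_natCast]
        simp [List.getD]
      have h2 : PySem.List.pyGetD (p :: (qs' ++ [q])) (((p :: qs').length : Int) - 1) 0
          = qs'.getLastD p := by
        rw [← List.cons_append, pyGetD_append_left _ q _ (by omega) (by omega),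
            pyGetD_last (p :: qs') (by simp), List.getLast_eq_getLastD]
      simp only [List.foldl_cons, List.foldl_nil, h1, h2, pairs_snoc, List.append_assoc]
    · intro acc i hi
      rw [PySem.List.mem_pyRange_one] at hi
      dsimp only
      rw [← List.cons_append, pyGetD_append_left _ q i (by omega) (by exact hi.2),
          pyGetD_append_left _ q (i - 1) (by omega) (by omega)]

theorem A_eq (ls : List Int) :
    convert_labels ls = pairs ls (-1) (bords ls ++ [(ls.length : Int) - 1]) := by
  have h0 : convert_labels ls =
      (PySem.List.pyRange 1 ((((-1) :: (bords ls ++ [(ls.length : Int) - 1])).length : Int)) 1).foldl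
        (fun acc i =>
          acc ++ [(PySem.List.pyGetD ls
                     (PySem.List.pyGetD ((-1) :: (bords ls ++ [(ls.length : Int) - 1])) i 0) 0,
                   PySem.List.pyGetD ((-1) :: (bords ls ++ [(ls.length : Int) - 1])) (i - 1) 0 + 1,
                   PySem.List.pyGetD ((-1) :: (bords ls ++ [(ls.length : Int) - 1])) i 0)]) [] := rfl
  rw [h0, foldA_eq ls (-1) (bords ls ++ [(ls.length : Int) - 1]) []]
  simp

theorem zipAdj_snoc (l : List Int) (x : Int) (h : l ≠ []) :
    (l ++ [x]).zip ((l ++ [x]).tail) = l.zip l.tail ++ [(l.getLast h, x)] := by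
  induction l with
  | nil => exact absurd rfl h
  | cons a l' ih =>
    cases l' with
    | nil => simp
    | cons b l'' =>
      have hne : (b :: l'') ≠ [] := by simp
      have := ih hne
      simp only [List.cons_append, List.tail_cons, List.zip_cons_cons] at this ⊢
      rw [List.getLast_cons hne]
      simpa using this

theorem altLoop_snoc (zs : List (Int × Int)) (prev cur i s : Int) (acc : List (Int × Int × Int)) :
    altLoop i s acc (zs ++ [(prev, cur)]) =
      (if cur ≠ prev then
        ((altLoop i s acc zs).1 ++ [(prev, (altLoop i s acc zs).2, i + (zs.length : Int) - 1)],
          i + (zs.length : Int))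
       else altLoop i s acc zs) := by
  induction zs generalizing i s acc with
  | nil => simp [altLoop]
  | cons z zs' ih =>
    obtain ⟨p', c'⟩ := z
    have hlen : ((((p', c') :: zs').length : Int)) = (zs'.length : Int) + 1 := by
      simp
    have h1 : i + 1 + (zs'.length : Int) = i + ((zs'.length : Int) + 1) := by ring
    simp only [List.cons_append, altLoop, hlen]
    by_cases hc : c' ≠ p'
    · rw [if_pos hc, if_pos hc, ih, h1]
    · rw [if_neg hc, if_neg hc, ih, h1]

theorem bords_snoc (l : List Int) (x : Int) (h : l ≠ []) :
    bords (l ++ [x]) =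
      bords l ++ (if l.getLast h ≠ x then [(l.length : Int) - 1] else []) := by
  have hl : 0 < l.length := List.length_pos_iff.mpr h
  unfold bords
  have hlen : (((l ++ [x]).length : Int)) - 1 = ((l.length : Int) - 1) + 1 := by
    simp only [List.length_append, List.length_cons, List.length_nil]
    push_cast
    ring
  rw [hlen, PySem.List.pyRange_one_succ_right (by omega), List.filter_append]
  congr 1
  · apply List.filter_congr
    intro i hi
    rw [PySem.List.mem_pyRange_one] at hi
    rw [pyGetD_append_left l x i (by omega) (by omega),
        pyGetD_append_left l x (i + 1) (by omega) (by omega)]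
  · have h1 : PySem.List.pyGetD (l ++ [x]) ((l.length : Int) - 1) 0 = l.getLast h := by
      rw [pyGetD_append_left l x _ (by omega) (by omega), pyGetD_last l h]
    have h2 : PySem.List.pyGetD (l ++ [x]) (((l.length : Int) - 1) + 1) 0 = x := by
      have : ((l.length : Int) - 1) + 1 = (l.length : Int) := by ring
      rw [this, PySem.List.pyGetD_natCast]
      simp [List.getD]
    simp only [List.filter, h1, h2]
    by_cases hc : l.getLast h ≠ x <;> simp [hc]

theorem bords_mem (ls : List Int) (q : Int) (hq : q ∈ bords ls) :
    0 ≤ q ∧ q < (ls.length : Int) - 1 := by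
  unfold bords at hq
  have hm := (List.mem_filter.mp hq).1
  rwa [PySem.List.mem_pyRange_one] at hm

-- the invariant of B's scan: result so far = segments of the closed runs, snd = current run's start
theorem key (ls : List Int) (h : ls ≠ []) :
    altLoop 1 0 [] (ls.zip (ls.tail)) =
      (pairs ls (-1) (bords ls), (bords ls).getLastD (-1) + 1) := by
  induction ls using List.reverseRecOn with
  | nil => exact absurd rfl h
  | append_singleton l x ih =>
    by_cases hl : l = []
    · subst hl
      norm_num [altLoop, bords, pairs, PySem.List.pyRange_one_eq_nil]
    · have hpos : 0 < l.length := List.length_pos_iff.mpr hl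
      have hzlen : ((l.zip l.tail).length : Int) = (l.length : Int) - 1 := by
        rw [List.length_zip, List.length_tail]
        omega
      rw [zipAdj_snoc l x hl, altLoop_snoc, ih hl, hzlen, bords_snoc l x hl]
      have hcongr : ∀ q ∈ bords l, PySem.List.pyGetD (l ++ [x]) q 0 = PySem.List.pyGetD l q 0 := by
        intro q hq
        obtain ⟨h0, h1⟩ := bords_mem l q hq
        exact pyGetD_append_left l x q h0 (by omega)
      by_cases hx : x = l.getLast hl
      · rw [if_neg (not_not_intro hx), if_neg (not_not_intro hx.symm), List.append_nil,
            pairs_congr (l ++ [x]) l (-1) (bords l) hcongr]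
      · have hx' : l.getLast hl ≠ x := fun e => hx e.symm
        have hcongr2 : ∀ q ∈ bords l ++ [(l.length : Int) - 1],
            PySem.List.pyGetD (l ++ [x]) q 0 = PySem.List.pyGetD l q 0 := by
          intro q hq
          rcases List.mem_append.mp hq with hq | hq
          · exact hcongr q hq
          · have : q = (l.length : Int) - 1 := by simpa using hq
            subst this
            exact pyGetD_append_left l x _ (by omega) (by omega)
        have harith1 : (1:Int) + ((l.length : Int) - 1) = (l.length : Int) := by ring
        rw [if_pos hx, if_pos hx',
            pairs_congr (l ++ [x]) l (-1) (bords l ++ [(l.length : Int) - 1]) hcongr2,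
            pairs_snoc, pyGetD_last l hl, List.getLastD_concat, harith1]
        simp

-- ===== VERDICT (by name: the statement is the Claim_ definition above) =====
theorem convert_labels_spec : Claim_equal_convert_labels := by
  intro ls _ hpre
  unfold Spec_convert_labels
  have hk := key ls hpre
  rw [A_eq, pairs_snoc]
  show _ = convert_labels_alt ls
  unfold convert_labels_alt
  rw [PySem.List.slice_from_one, hk, PySem.List.pyGetD_neg_one ls 0 hpre, pyGetD_last ls hpre]
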